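-- pv_equiv track=rewrite | github.com/bardia-ab/ManAge | ManAge/processing/data_process.py | extract_delays
-- ===== SOURCE A (Python) =====
-- def extract_delays(shift_values, CUT_indexes, N_Parallel, sps):
--     segments = [[]]
--     while shift_values:
--         #segments.append([])
--         while 1:
--             shift_value = shift_values.pop(0)
--             N_triggered = sum([1 for c in CUT_indexes[0] if c == '1'])
--             if (len(segments[-1]) + N_triggered) > N_Parallel:
--                 segments[-1].sort()
--                 segments.append([])
--
--             for CUT_idx, val in enumerate(CUT_indexes.pop(0)):
--                 if val == '1':
--                     delay = shift_value * sps
--                     segments[-1].append((CUT_idx, delay))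
--
--
--             '''if len(segments[-1]) >= N_Parallel:
--                 segments[-1].sort()
--                 break'''
--
--             if not shift_values:
--                 segments[-1].sort()
--                 break
--
--             '''prev_shift_value = shift_value
--             if shift_values:
--                 if shift_values[0] > prev_shift_value:
--                     segments[-1].sort()
--                     break
--             else:
--                 segments[-1].sort()
--                 break'''
--
--     return segments
-- ===== SOURCE B (Python) =====
-- def extract_delays(shift_values, CUT_indexes, N_Parallel, sps):
--     # Phase 1: consume the inputs in lockstep (same mutation of both arguments as A),
--     # building one group of (index, delay) pairs per shift value.
--     groups = []
--     while shift_values: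
--         shift_value = shift_values.pop(0)
--         cut = CUT_indexes.pop(0)
--         groups.append([(i, shift_value * sps) for i, val in enumerate(cut) if val == '1'])
--     # Phase 2: pack whole groups into capacity-bounded segments, sorting each
--     # segment exactly once when it is closed (and the last one at the end).
--     segments = []
--     cur = []
--     for group in groups:
--         if len(cur) + len(group) > N_Parallel:
--             segments.append(sorted(cur))
--             cur = []
--         cur.extend(group)
--     segments.append(sorted(cur))
--     return segments
-- ===== Notes on version B (the rewrite author's own statement) =====
-- stated objective: simpler
-- what changed: A's single fused loop that pops inputs, checks capacity, appends pair-by-pair into segments[-1] and sorts at two different program points is split into two plain passes: one lockstep-pop pass building a list of (index, delay) groups, and one packing pass over those groups with an explicit current-segment accumulator that sorts each segment exactly once when it is closed.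
import Mathlib
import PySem

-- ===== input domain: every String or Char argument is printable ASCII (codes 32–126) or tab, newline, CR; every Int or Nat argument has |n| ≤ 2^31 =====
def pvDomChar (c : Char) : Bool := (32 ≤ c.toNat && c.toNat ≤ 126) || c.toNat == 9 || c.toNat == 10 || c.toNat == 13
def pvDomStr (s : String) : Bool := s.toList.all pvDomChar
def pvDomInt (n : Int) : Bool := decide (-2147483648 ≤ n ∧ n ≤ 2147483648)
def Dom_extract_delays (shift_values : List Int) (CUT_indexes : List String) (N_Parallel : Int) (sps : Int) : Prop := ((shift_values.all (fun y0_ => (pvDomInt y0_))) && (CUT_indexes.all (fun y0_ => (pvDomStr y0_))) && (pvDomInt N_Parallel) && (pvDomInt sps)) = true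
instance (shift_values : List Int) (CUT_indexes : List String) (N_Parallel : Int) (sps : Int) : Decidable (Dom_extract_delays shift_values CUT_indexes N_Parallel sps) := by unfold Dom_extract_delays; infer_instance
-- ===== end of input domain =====

-- B splits A's fused pop/pack/sort loop into a group-building pass plus a packing pass
-- with an explicit current-segment accumulator (objective: simpler; same cost).
-- Both programs pop from their two list arguments in lockstep; the equivalence proved
-- here is about the return value (B performs the same mutation as A).

-- ===== PORT A =====
-- Python sorts lists of 2-tuples lexicographically: sorted2 with fst/snd keys.
def pvSortPairs (xs : List (Int × Int)) : List (Int × Int) :=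
  PySem.List.sorted2 xs Prod.fst Prod.snd false

-- segments[-1].sort()
def pvSortLast (segs : List (List (Int × Int))) : List (List (Int × Int)) :=
  segs.dropLast ++ [pvSortPairs (segs.getLastD [])]

-- segments[-1].append(x)
def pvAppendLast (segs : List (List (Int × Int))) (x : Int × Int) : List (List (Int × Int)) :=
  segs.dropLast ++ [segs.getLastD [] ++ [x]]

-- the fused while-loop of A: pop shift_value and CUT_indexes[0] in lockstep
def pvALoop (sv : List Int) (ci : List String) (N sps : Int)
    (segs : List (List (Int × Int))) : List (List (Int × Int)) :=
  match sv, ci with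
  | [], _ => segs                      -- outer 'while shift_values' guard
  | _ :: _, [] => segs                 -- Python raises IndexError here; excluded by Pre_
  | shift :: svRest, c :: ciRest =>
      -- N_triggered = sum([1 for c in CUT_indexes[0] if c == '1'])
      let nTrig : Int := ((c.toList.filter (fun ch => ch = '1')).map (fun _ => (1 : Int))).sum
      let segs1 := if ((segs.getLastD []).length : Int) + nTrig > N
                   then pvSortLast segs ++ [[]] else segs
      -- for CUT_idx, val in enumerate(CUT_indexes.pop(0)): …
      let segs2 := (PySem.List.enumerate c.toList 0).foldl
        (fun s q => if q.2 = '1' then pvAppendLast s (q.1, shift * sps) else s) segs1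
      if svRest = [] then pvSortLast segs2
      else pvALoop svRest ciRest N sps segs2

def extract_delays (shift_values : List Int) (CUT_indexes : List String) (N_Parallel : Int) (sps : Int) : List (List (Int × Int)) :=
  pvALoop shift_values CUT_indexes N_Parallel sps [[]]

-- ===== PORT B =====
-- [(i, shift_value * sps) for i, val in enumerate(cut) if val == '1']
def pvBGroup (shift sps : Int) (c : String) : List (Int × Int) :=
  (PySem.List.enumerate c.toList 0).filterMap
    (fun q => if q.2 = '1' then some (q.1, shift * sps) else none)

-- phase 1: the lockstep-pop loop building the group list
def pvBGroups (sv : List Int) (ci : List String) (sps : Int) : List (List (Int × Int)) :=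
  match sv, ci with
  | [], _ => []
  | _ :: _, [] => []                   -- Python raises IndexError here; excluded by Pre_
  | shift :: svRest, c :: ciRest => pvBGroup shift sps c :: pvBGroups svRest ciRest sps

-- phase 2: pack groups into segments, sorting a segment once when it is closed
def pvBPack (N : Int) (groups : List (List (Int × Int)))
    (done : List (List (Int × Int))) (cur : List (Int × Int)) : List (List (Int × Int)) :=
  match groups with
  | [] => done ++ [pvSortPairs cur]
  | g :: gs =>
      if (cur.length : Int) + (g.length : Int) > N
      then pvBPack N gs (done ++ [pvSortPairs cur]) g
      else pvBPack N gs done (cur ++ g)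

def extract_delays_alt (shift_values : List Int) (CUT_indexes : List String) (N_Parallel : Int) (sps : Int) : List (List (Int × Int)) :=
  pvBPack N_Parallel (pvBGroups shift_values CUT_indexes sps) [] []

-- ===== PRECONDITION & SPEC =====
-- A pops one CUT string per shift value, so it raises IndexError exactly when
-- shift_values is longer than CUT_indexes; those inputs are excluded.
def Pre_extract_delays (shift_values : List Int) (CUT_indexes : List String) (N_Parallel : Int) (sps : Int) : Prop :=
  shift_values.length ≤ CUT_indexes.length
instance (shift_values : List Int) (CUT_indexes : List String) (N_Parallel : Int) (sps : Int) : Decidable (Pre_extract_delays shift_values CUT_indexes N_Parallel sps) := by unfold Pre_extract_delays; infer_instance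

def pvWitness_extract_delays : List Int × List String × Int × Int :=
  ([3, 1, 2], ["10", "011", "11"], 2, 5)

def Spec_extract_delays (shift_values : List Int) (CUT_indexes : List String) (N_Parallel : Int) (sps : Int) (out : List (List (Int × Int))) : Prop := out = extract_delays_alt shift_values CUT_indexes N_Parallel sps
instance (shift_values : List Int) (CUT_indexes : List String) (N_Parallel : Int) (sps : Int) (out : List (List (Int × Int))) : Decidable (Spec_extract_delays shift_values CUT_indexes N_Parallel sps out) := by unfold Spec_extract_delays; infer_instance

-- ===== CLAIM (what is proved, stated in full; the proofs are below) =====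
def Claim_equal_extract_delays : Prop := ∀ (shift_values : List Int) (CUT_indexes : List String) (N_Parallel : Int) (sps : Int), Dom_extract_delays shift_values CUT_indexes N_Parallel sps → Pre_extract_delays shift_values CUT_indexes N_Parallel sps → Spec_extract_delays shift_values CUT_indexes N_Parallel sps (extract_delays shift_values CUT_indexes N_Parallel sps)

-- ===== LEMMAS AND PROOFS =====

theorem pvSortLast_concat (done : List (List (Int × Int))) (cur : List (Int × Int)) :
    pvSortLast (done ++ [cur]) = done ++ [pvSortPairs cur] := by
  simp [pvSortLast]

theorem pvAppendLast_concat (done : List (List (Int × Int))) (cur : List (Int × Int)) (x : Int × Int) :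
    pvAppendLast (done ++ [cur]) x = done ++ [cur ++ [x]] := by
  simp [pvAppendLast]

-- A's element-by-element append loop, started on done ++ [cur], only grows the last segment
theorem pvFoldl_appendLast (shift sps : Int) :
    ∀ (l : List (Int × Char)) (done : List (List (Int × Int))) (cur : List (Int × Int)),
    l.foldl (fun s q => if q.2 = '1' then pvAppendLast s (q.1, shift * sps) else s) (done ++ [cur])
      = done ++ [cur ++ (l.filter (fun q => q.2 = '1')).map (fun q => (q.1, shift * sps))] := by
  intro l
  induction l with
  | nil => intro done cur; simp
  | cons q l ih =>
      intro done cur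
      by_cases h : q.2 = '1'
      · simp [List.foldl_cons, h, pvAppendLast_concat, ih]
      · simp [List.foldl_cons, h, ih]

-- B's comprehension is the same filter-then-map
theorem pvBGroup_eq (shift sps : Int) (c : String) :
    pvBGroup shift sps c
      = ((PySem.List.enumerate c.toList 0).filter (fun q => q.2 = '1')).map
          (fun q => (q.1, shift * sps)) := by
  unfold pvBGroup
  induction PySem.List.enumerate c.toList 0 with
  | nil => rfl
  | cons q l ih =>
      by_cases h : q.2 = '1' <;> simp [h, ih]

-- the foldl-append loop of A builds exactly B's group at the end of the last segment
theorem pvFoldl_appendLast' (shift sps : Int) (c : String)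
    (done : List (List (Int × Int))) (cur : List (Int × Int)) :
    (PySem.List.enumerate c.toList 0).foldl
        (fun s q => if q.2 = '1' then pvAppendLast s (q.1, shift * sps) else s) (done ++ [cur])
      = done ++ [cur ++ pvBGroup shift sps c] := by
  rw [pvFoldl_appendLast, ← pvBGroup_eq]

theorem pvFilterEnum_len :
    ∀ (l : List Char) (s : Int),
    ((PySem.List.enumerate l s).filter (fun q => q.2 = '1')).length
      = (l.filter (fun ch => ch = '1')).length := by
  intro l
  induction l with
  | nil => intro s; rfl
  | cons ch l ih =>
      intro s
      by_cases h : ch = '1' <;> simp [PySem.List.enumerate_cons, h, ih]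

-- A's N_triggered equals the length of B's group
theorem pvNTrig_eq (shift sps : Int) (c : String) :
    ((c.toList.filter (fun ch => ch = '1')).map (fun _ => (1 : Int))).sum
      = ((pvBGroup shift sps c).length : Int) := by
  rw [pvBGroup_eq, PySem.List.sum_map_const_int]
  simp [pvFilterEnum_len]

-- main invariant: A's loop on done ++ [cur] is B's packing of the remaining groups
theorem pvLoop_eq (N sps : Int) :
    ∀ (sv : List Int) (ci : List String) (done : List (List (Int × Int))) (cur : List (Int × Int)),
    sv ≠ [] → sv.length ≤ ci.length →
    pvALoop sv ci N sps (done ++ [cur]) = pvBPack N (pvBGroups sv ci sps) done cur := by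
  intro sv
  induction sv with
  | nil => intro _ _ _ h _; exact absurd rfl h
  | cons shift svRest ih =>
      intro ci done cur _ hlen
      cases ci with
      | nil => simp at hlen
      | cons c ciRest =>
        rw [pvALoop, pvBGroups, pvBPack]
        rw [pvNTrig_eq shift sps c]
        simp only [List.getLastD_concat]
        by_cases hov : ((cur.length : Int)) + ((pvBGroup shift sps c).length : Int) > N
        · rw [if_pos hov, if_pos hov, pvSortLast_concat, pvFoldl_appendLast', List.nil_append]
          by_cases hrest : svRest = []
          · subst hrest
            simp [pvBGroups, pvBPack, pvSortLast]
          · rw [if_neg hrest]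
            exact ih ciRest _ _ hrest (by simpa using hlen)
        · rw [if_neg hov, if_neg hov, pvFoldl_appendLast']
          by_cases hrest : svRest = []
          · subst hrest
            simp [pvBGroups, pvBPack, pvSortLast]
          · rw [if_neg hrest]
            exact ih ciRest _ _ hrest (by simpa using hlen)

-- ===== VERDICT (by name: the statement is the Claim_ definition above) =====
theorem extract_delays_spec : Claim_equal_extract_delays := by
  intro sv ci N sps _ hpre
  unfold Spec_extract_delays extract_delays extract_delays_alt
  cases sv with
  | nil => rfl
  | cons shift svRest =>
      rw [show ([[]] : List (List (Int × Int))) = [] ++ [([] : List (Int × Int))] from rfl]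
      exact pvLoop_eq N sps (shift :: svRest) ci [] [] (by simp) hpre
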